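-- pv_equiv track=rewrite | github.com/TanmayRaut058/Python-Programming | DFA.py | q0
-- ===== SOURCE A (Python) =====
-- def q0(text):
--     if not text:
--         return 'q0'
--
--     if text[0] == 'a':
--         return q1(text[1:])
--     elif text[0] == 'b':
--         return q0(text[1:])
--     else:
--         return 'q0'
--
-- def q1(text):
--     if not text:
--         return 'q1'
--
--     if text[0] == 'a':
--         return q1(text[1:])
--     elif text[0] == 'b':
--         return q0(text[1:])
--     else:
--         return 'q0'
-- ===== SOURCE B (Python) =====
-- def q0(text):
--     # closed form: any char outside {'a','b'} forces 'q0'; otherwise the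
--     # final state is determined by the last character ('a' -> q1, else q0).
--     if any(c not in 'ab' for c in text):
--         return 'q0'
--     if not text:
--         return 'q0'
--     return 'q1' if text[-1] == 'a' else 'q0'
-- ===== Notes on version B (the rewrite author's own statement) =====
-- stated objective: simpler
-- what changed: Replaces the mutually recursive two-state DFA walk by a closed form: one validity scan for characters outside {'a','b'} plus an inspection of the last character.
import Mathlib
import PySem

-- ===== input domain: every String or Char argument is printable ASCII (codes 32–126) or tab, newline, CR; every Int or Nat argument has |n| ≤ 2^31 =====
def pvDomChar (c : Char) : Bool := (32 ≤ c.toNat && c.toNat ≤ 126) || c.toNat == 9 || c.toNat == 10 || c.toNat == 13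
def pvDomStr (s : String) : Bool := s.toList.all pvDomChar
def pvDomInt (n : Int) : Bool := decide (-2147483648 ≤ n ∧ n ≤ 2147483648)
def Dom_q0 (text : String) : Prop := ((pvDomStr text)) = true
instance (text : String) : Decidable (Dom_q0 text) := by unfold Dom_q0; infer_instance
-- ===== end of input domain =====

-- B replaces the mutually recursive two-state DFA walk by a closed form
-- (validity scan + last character); objective: simpler.


-- ===== PORT A =====
-- mutual recursion over the character list, step for step as in Source A
mutual
def q0A : List Char → String
  | [] => "q0"
  | c :: rest => if c = 'a' then q1A rest else if c = 'b' then q0A rest else "q0"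
def q1A : List Char → String
  | [] => "q1"
  | c :: rest => if c = 'a' then q1A rest else if c = 'b' then q0A rest else "q0"
end

def q0 (text : String) : String := q0A text.toList

-- ===== PORT B =====
def q0_alt (text : String) : String :=
  let l := text.toList
  if l.any (fun c => !(c = 'a' || c = 'b')) then "q0"
  else match l.getLast? with
    | none => "q0"
    | some c => if c = 'a' then "q1" else "q0"

-- ===== PRECONDITION & SPEC =====
def Spec_q0 (text : String) (out : String) : Prop := out = q0_alt text
instance (text : String) (out : String) : Decidable (Spec_q0 text out) := by unfold Spec_q0; infer_instance

-- ===== CLAIM (what is proved, stated in full; the proofs are below) =====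
def Claim_equal_q0 : Prop := ∀ (text : String), Dom_q0 text → Spec_q0 text (q0 text)

-- ===== LEMMAS AND PROOFS =====

-- closed form of B's body on the list side, for both start states
def spec0 (l : List Char) : String :=
  if l.any (fun c => !(c = 'a' || c = 'b')) then "q0"
  else match l.getLast? with
    | none => "q0"
    | some c => if c = 'a' then "q1" else "q0"

def spec1 (l : List Char) : String :=
  if l.any (fun c => !(c = 'a' || c = 'b')) then "q0"
  else match l.getLast? with
    | none => "q1"
    | some c => if c = 'a' then "q1" else "q0"

theorem runs_eq_spec (l : List Char) : q0A l = spec0 l ∧ q1A l = spec1 l := by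
  induction l with
  | nil => constructor <;> rfl
  | cons c rest ih =>
    obtain ⟨ih0, ih1⟩ := ih
    constructor <;> {
      simp only [q0A, q1A]
      by_cases ha : c = 'a'
      · subst ha
        rw [ih1]
        cases rest with
        | nil => rfl
        | cons d r =>
          simp [spec0, spec1, List.getLast?_cons, List.any_cons]
      · by_cases hb : c = 'b'
        · subst hb
          rw [ih0]
          cases rest with
          | nil => simp [ha, spec0, spec1]
          | cons d r =>
            simp [spec0, spec1, List.getLast?_cons, List.any_cons]
        · simp [ha, hb, spec0, spec1]
    }

-- ===== VERDICT (by name: the statement is the Claim_ definition above) =====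
theorem q0_spec : Claim_equal_q0 := by
  intro text _
  show q0A text.toList = q0_alt text
  rw [(runs_eq_spec text.toList).1]
  rfl
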